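-- pv_equiv track=rewrite | github.com/teruyam/snowmist | snowmist/compute_manager.py | format_thumbprint
-- ===== SOURCE A (Python) =====
-- def format_thumbprint(thumbprint):
--   if not thumbprint:
--     raise ValueError
--   result = ""
--   counter = 0
--   for c in thumbprint.upper():
--     if counter == 2:
--       result += ":"
--       counter = 0
--     result += c
--     counter += 1
--   return result
-- ===== SOURCE B (Python) =====
-- def format_thumbprint(thumbprint):
--     if not thumbprint:
--         raise ValueError
--     s = thumbprint.upper()
--     return ":".join(s[i:i + 2] for i in range(0, len(s), 2))
-- ===== Notes on version B (the rewrite author's own statement) =====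
-- stated objective: simpler
-- what changed: Replaces the per-character loop with a mutable result string and a reset counter by slicing the uppercased string into 2-char groups over range(0, len, 2) and joining them with ':'.
import Mathlib
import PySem

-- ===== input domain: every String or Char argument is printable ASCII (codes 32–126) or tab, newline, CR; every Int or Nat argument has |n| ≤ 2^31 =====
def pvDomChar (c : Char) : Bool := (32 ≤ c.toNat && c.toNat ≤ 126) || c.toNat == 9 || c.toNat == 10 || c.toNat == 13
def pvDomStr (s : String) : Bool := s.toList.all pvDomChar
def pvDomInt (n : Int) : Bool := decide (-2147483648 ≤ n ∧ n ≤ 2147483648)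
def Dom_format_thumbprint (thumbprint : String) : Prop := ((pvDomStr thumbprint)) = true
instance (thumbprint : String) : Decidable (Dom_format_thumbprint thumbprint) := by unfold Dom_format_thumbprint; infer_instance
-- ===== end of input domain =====

-- B replaces A's per-character loop with a reset counter by joining 2-char slices of the
-- uppercased string with ':' (simpler decomposition; same cost).


-- ===== PORT A =====
-- loop body of A: if counter == 2 then result += ":"; counter = 0; then result += c; counter += 1
def pvStepA (st : List Char × Int) (c : Char) : List Char × Int :=
  let st := if st.2 = 2 then (st.1 ++ [':'], 0) else st
  (st.1 ++ [c], st.2 + 1)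

def format_thumbprint (thumbprint : String) : String :=
  String.ofList (((PySem.Chars.upper thumbprint.toList).foldl pvStepA ([], 0)).1)

-- ===== PORT B =====
def format_thumbprint_alt (thumbprint : String) : String :=
  let s := PySem.Chars.upper thumbprint.toList
  String.ofList (PySem.Chars.join [':']
    ((PySem.List.pyRange 0 (s.length : Int) 2).map
      (fun i => PySem.List.slice s (some i) (some (i + 2)))))

-- ===== PRECONDITION & SPEC =====
-- A (and B) raise ValueError on the empty (falsy) string; that is the only exception.
def Pre_format_thumbprint (thumbprint : String) : Prop := thumbprint ≠ ""
instance (thumbprint : String) : Decidable (Pre_format_thumbprint thumbprint) := by unfold Pre_format_thumbprint; infer_instance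
def pvWitness_format_thumbprint : String := "ab"

def Spec_format_thumbprint (thumbprint : String) (out : String) : Prop := out = format_thumbprint_alt thumbprint
instance (thumbprint : String) (out : String) : Decidable (Spec_format_thumbprint thumbprint out) := by unfold Spec_format_thumbprint; infer_instance

-- ===== CLAIM (what is proved, stated in full; the proofs are below) =====
def Claim_equal_format_thumbprint : Prop := ∀ (thumbprint : String), Dom_format_thumbprint thumbprint → Pre_format_thumbprint thumbprint → Spec_format_thumbprint thumbprint (format_thumbprint thumbprint)

-- ===== LEMMAS AND PROOFS =====

-- the 2-char groups of a list, recursively (proof-side characterisation of B's slicing)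
def chunk2 : List Char → List (List Char)
  | [] => []
  | [c] => [[c]]
  | c :: d :: r => [c, d] :: chunk2 r

-- what A's loop emits after a full group (counter = 2): a ':' then the formatted rest
def tailFmt : List Char → List Char
  | [] => []
  | [c] => [':', c]
  | c :: d :: r => ':' :: c :: d :: tailFmt r

theorem join_chunk_cons (r : List Char) : ∀ p : List Char,
    PySem.Chars.join [':'] (p :: chunk2 r) = p ++ tailFmt r := by
  induction r using chunk2.induct with
  | case1 => intro p; simp [chunk2, tailFmt, PySem.Chars.join_singleton]
  | case2 c => intro p
               simp [chunk2, tailFmt, PySem.Chars.join_cons_cons, PySem.Chars.join_singleton]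
  | case3 c d r ih =>
      intro p
      rw [chunk2, PySem.Chars.join_cons_cons, ih]
      simp [tailFmt]

theorem foldA_from2 (l : List Char) : ∀ acc : List Char,
    (l.foldl pvStepA (acc, 2)).1 = acc ++ tailFmt l := by
  induction l using chunk2.induct with
  | case1 => intro acc; simp [tailFmt]
  | case2 c => intro acc; simp [pvStepA, tailFmt]
  | case3 c d r ih =>
      intro acc
      show (r.foldl pvStepA (pvStepA (pvStepA (acc, 2) c) d)).1 = _
      rw [show pvStepA (pvStepA (acc, 2) c) d = (acc ++ [':', c, d], 2) from by
        simp [pvStepA]]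
      rw [ih]
      simp [tailFmt]

theorem foldA_from0 (l : List Char) (acc : List Char) :
    (l.foldl pvStepA (acc, 0)).1 = acc ++ PySem.Chars.join [':'] (chunk2 l) := by
  match l with
  | [] => simp [chunk2, PySem.Chars.join_nil]
  | [c] => simp [pvStepA, chunk2, PySem.Chars.join_singleton]
  | c :: d :: r =>
      show (r.foldl pvStepA (pvStepA (pvStepA (acc, 0) c) d)).1 = _
      rw [show pvStepA (pvStepA (acc, 0) c) d = (acc ++ [c, d], 2) from by
        simp [pvStepA]]
      rw [foldA_from2, chunk2, join_chunk_cons]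
      simp

theorem take_drop_chunks (l : List Char) :
    (List.range ((l.length + 1) / 2)).map (fun k => (l.drop (2 * k)).take 2) = chunk2 l := by
  induction l using chunk2.induct with
  | case1 => simp [chunk2]
  | case2 c => simp [chunk2, List.range_succ]
  | case3 c d r ih =>
      have hlen : ((c :: d :: r).length + 1) / 2 = (r.length + 1) / 2 + 1 := by
        simp; omega
      rw [hlen, List.range_succ_eq_map]
      simp only [List.map_cons, List.map_map]
      rw [chunk2]
      refine List.cons_eq_cons.mpr ⟨by simp, ?_⟩
      rw [← ih]
      refine List.map_congr_left fun k _ => ?_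
      have h2 : 2 * (k + 1) = 2 * k + 1 + 1 := by ring
      simp [Function.comp, h2]

theorem chunks_eq (l : List Char) :
    (PySem.List.pyRange 0 (l.length : Int) 2).map
      (fun i => PySem.List.slice l (some i) (some (i + 2))) = chunk2 l := by
  rw [PySem.List.pyRange_of_pos 0 ((l.length : Int)) (by norm_num)]
  by_cases h : l = []
  · subst h; simp [chunk2]
  · have hpos : (0 : Int) < (l.length : Int) := by
      have : l.length ≠ 0 := by simpa using h
      omega
    rw [if_pos hpos]
    have hcnt : (((l.length : Int) - 0 + 2 - 1) / 2).toNat = (l.length + 1) / 2 := by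
      omega
    rw [hcnt, List.map_map, ← take_drop_chunks]
    refine List.map_congr_left fun k _ => ?_
    have h2 := PySem.List.slice_natCast_add l (2 * k) 2
    push_cast at h2
    simpa using h2

-- ===== VERDICT (by name: the statement is the Claim_ definition above) =====
theorem format_thumbprint_spec : Claim_equal_format_thumbprint := by
  intro t _ _
  unfold Spec_format_thumbprint format_thumbprint
  rw [foldA_from0]
  simp only [format_thumbprint_alt, chunks_eq, List.nil_append]
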